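-- pv_equiv track=rewrite | github.com/miramastoras/samples | python_samples/prog4.py | translate_morse
-- ===== SOURCE A (Python) =====
-- code = [["a",".-"],["b","-..."],["c","-.-."],["d","-.."],
--         ["e","."],["f","..-."],["g","--."],["h","...."],
--         ["i",".."],["j",".---"],["k","-.-"],["l",".-.."],
--         ["m","--"],["n","-."],["o","---"],["p",".--."],
--         ["q","--.-"],["r",".-."],["s","..."],["t","-"],
--         ["u","..-"],["v","...-"],["w",".--"],["x","-..-"],
--         ["y","-.--"],["z","--.."]]
--
-- def is_valid(character):
--     'expects string as argument'
--     'checks to see if each character is part of code array'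
--     for char in code:
--         if character == char[0]:
--             return True
--         else:
--             pass
--     return False
--
-- def translate_morse(sentence):
--     'expects sentence as argument, translates it to morse code'
--     morse = 'Morse code: '
--     for char in sentence:
--         if char == ' ':
--             morse = morse + '   '
--         elif is_valid(char) == True:
--             index = 0
--             for i in code:
--                 if i[0] == char:
--                     morse = morse + ' ' + i[1]
--         else:
--             morse = morse + "###"
--     return morse
-- ===== SOURCE B (Python) =====
-- code = [["a",".-"],["b","-..."],["c","-.-."],["d","-.."],
--         ["e","."],["f","..-."],["g","--."],["h","...."],
--         ["i",".."],["j",".---"],["k","-.-"],["l",".-.."],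
--         ["m","--"],["n","-."],["o","---"],["p",".--."],
--         ["q","--.-"],["r",".-."],["s","..."],["t","-"],
--         ["u","..-"],["v","...-"],["w",".--"],["x","-..-"],
--         ["y","-.--"],["z","--.."]]
--
--
-- def translate_morse(sentence):
--     'expects sentence as argument, translates it to morse code'
--     d = {k: ' ' + v for k, v in code}
--     words = sentence.split(' ')
--     return 'Morse code: ' + '   '.join(
--         ''.join(d.get(ch, '###') for ch in word) for word in words)
-- ===== Notes on version B (the rewrite author's own statement) =====
-- stated objective: faster
-- what changed: B restructures the translation as staged passes: it splits the sentence on spaces, encodes each word's characters through a precomputed lookup table, and joins the encoded words with the triple-space separator, eliminating A's per-character space branch, its two linear scans of the code table per letter, and its quadratic repeated string concatenation.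
import Mathlib
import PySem

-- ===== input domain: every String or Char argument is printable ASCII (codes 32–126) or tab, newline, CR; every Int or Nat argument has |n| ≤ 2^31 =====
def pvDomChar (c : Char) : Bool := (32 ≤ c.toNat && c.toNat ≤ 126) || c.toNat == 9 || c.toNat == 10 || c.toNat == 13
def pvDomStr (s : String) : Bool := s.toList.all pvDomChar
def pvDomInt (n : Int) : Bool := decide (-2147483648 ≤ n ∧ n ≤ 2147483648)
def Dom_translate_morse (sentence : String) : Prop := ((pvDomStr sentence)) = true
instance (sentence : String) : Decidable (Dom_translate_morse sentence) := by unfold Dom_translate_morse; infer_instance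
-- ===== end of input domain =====

-- B restructures the translation as staged passes — split the sentence on spaces, encode each
-- word via a precomputed table, join the encoded words with '   ' — instead of A's per-character
-- branch loop with two linear table scans per letter.

-- the module-level `code` table (Python 1-char strings as Char keys)
def code_table : List (Char × String) :=
  [('a',".-"),('b',"-..."),('c',"-.-."),('d',"-.."),('e',"."),('f',"..-."),('g',"--."),('h',"...."),('i',".."),('j',".---"),('k',"-.-"),('l',".-.."),('m',"--"),('n',"-."),('o',"---"),('p',".--."),('q',"--.-"),('r',".-."),('s',"..."),('t',"-"),('u',"..-"),('v',"...-"),('w',".--"),('x',"-..-"),('y',"-.--"),('z',"--..")]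

-- ===== PORT A =====
-- the `for char in code: if character == char[0]: return True` loop of is_valid
def pvIsValidLoop : List (Char × String) → Char → Bool
  | [], _ => false
  | p :: rest, c => if c == p.1 then true else pvIsValidLoop rest c

def is_valid (character : Char) : Bool := pvIsValidLoop code_table character

def translate_morse (sentence : String) : String :=
  String.ofList <| sentence.toList.foldl (fun morse char =>
    if char == ' ' then morse ++ "   ".toList
    else if is_valid char = true then
      -- inner `for i in code` loop with no break: scans the whole table
      code_table.foldl (fun m i => if i.1 == char then m ++ ' ' :: i.2.toList else m) morse
    else morse ++ "###".toList) "Morse code: ".toList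

-- ===== PORT B =====
-- the dict comprehension built once: d = {k: ' ' + v for k, v in code}
def pvMorseDict : PySem.Dict Char (List Char) :=
  PySem.Dict.ofList (code_table.map (fun p => (p.1, ' ' :: p.2.toList)))

-- ''.join(d.get(ch, '###') for ch in word)
def pvEncodeWord (w : List Char) : List Char :=
  (w.map (fun ch => pvMorseDict.getD ch "###".toList)).flatten

def translate_morse_alt (sentence : String) : String :=
  -- words = sentence.split(' ');  'Morse code: ' + '   '.join(encoded words)
  String.ofList ("Morse code: ".toList ++
    PySem.Chars.join "   ".toList ((sentence.toList.splitOn ' ').map pvEncodeWord))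

-- ===== PRECONDITION & SPEC =====
def Spec_translate_morse (sentence : String) (out : String) : Prop := out = translate_morse_alt sentence
instance (sentence : String) (out : String) : Decidable (Spec_translate_morse sentence out) := by unfold Spec_translate_morse; infer_instance

-- ===== CLAIM (what is proved, stated in full; the proofs are below) =====
def Claim_equal_translate_morse : Prop := ∀ (sentence : String), Dom_translate_morse sentence → Spec_translate_morse sentence (translate_morse sentence)

-- ===== LEMMAS AND PROOFS =====

-- what A emits for one character
def pvEmit (c : Char) : List Char :=
  if c == ' ' then "   ".toList
  else match (code_table.find? (fun p => p.1 == c)).map (·.2) with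
    | some v => ' ' :: v.toList
    | none => "###".toList

theorem pvIsValidLoop_eq_find? (l : List (Char × String)) (c : Char) :
    pvIsValidLoop l c = (l.find? (fun p => p.1 == c)).isSome := by
  induction l with
  | nil => rfl
  | cons p rest ih =>
    simp only [pvIsValidLoop, List.find?]
    cases hpc : p.1 == c
    · have h2 : (c == p.1) = false := by
        simp only [beq_eq_false_iff_ne] at hpc ⊢
        exact hpc.symm
      simp [h2, ih]
    · have h2 : (c == p.1) = true := by simp only [beq_iff_eq] at hpc ⊢; exact hpc.symm
      simp [h2]

theorem pv_inner_fold_no_match (l : List (Char × String)) (c : Char)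
    (h : ∀ p ∈ l, p.1 ≠ c) (acc : List Char) :
    l.foldl (fun m i => if i.1 == c then m ++ ' ' :: i.2.toList else m) acc = acc := by
  induction l generalizing acc with
  | nil => rfl
  | cons p rest ih =>
    have hb : (p.1 == c) = false := by simpa using h p (by simp)
    rw [List.foldl_cons, if_neg (by simp [hb])]
    exact ih (fun q hq => h q (by simp [hq])) acc

theorem pv_inner_fold_eq (l : List (Char × String)) (c : Char)
    (hnd : (l.map Prod.fst).Nodup) (acc : List Char) :
    l.foldl (fun m i => if i.1 == c then m ++ ' ' :: i.2.toList else m) acc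
      = match (l.find? (fun p => p.1 == c)).map (·.2) with
        | some v => acc ++ ' ' :: v.toList
        | none => acc := by
  induction l generalizing acc with
  | nil => rfl
  | cons p rest ih =>
    simp only [List.map_cons, List.nodup_cons] at hnd
    cases hb : p.1 == c
    · rw [List.foldl_cons, if_neg (by simp [hb])]
      simp only [List.find?, hb]
      exact ih hnd.2 acc
    · have h : p.1 = c := by simpa using hb
      rw [List.foldl_cons, if_pos (by simp [hb])]
      simp only [List.find?, hb, Option.map_some]
      refine pv_inner_fold_no_match rest c (fun q hq hqc => hnd.1 ?_) _
      rw [h, ← hqc]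
      exact List.mem_map_of_mem hq

theorem pv_code_nodup : (code_table.map Prod.fst).Nodup := by decide

theorem pv_stepA (acc : List Char) (c : Char) :
    (if c == ' ' then acc ++ "   ".toList
     else if is_valid c = true then
       code_table.foldl (fun m i => if i.1 == c then m ++ ' ' :: i.2.toList else m) acc
     else acc ++ "###".toList) = acc ++ pvEmit c := by
  unfold pvEmit
  by_cases hs : c = ' '
  · simp [hs]
  · rw [pv_inner_fold_eq code_table c pv_code_nodup acc]
    cases hf : code_table.find? (fun p => p.1 == c) with
    | none => simp [is_valid, pvIsValidLoop_eq_find?, hf, hs]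
    | some p => simp [is_valid, pvIsValidLoop_eq_find?, hf, hs]

-- the dict lookup is the find? over the code table (values prefixed with ' ')
theorem pv_get?_dict (c : Char) :
    pvMorseDict.get? c
      = (code_table.find? (fun p => p.1 == c)).map (fun p => ' ' :: p.2.toList) := by
  have h : pvMorseDict = PySem.Dict.mk (code_table.map (fun p => (p.1, ' ' :: p.2.toList))) := by
    decide
  rw [h]
  show ((code_table.map (fun p => (p.1, ' ' :: p.2.toList))).find? (fun p => p.1 == c)).map (·.2)
      = _
  rw [List.find?_map, Option.map_map]
  have hp : ((fun (p : Char × List Char) => p.1 == c) ∘ (fun p : Char × String => (p.1, ' ' :: p.2.toList)))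
      = (fun p : Char × String => p.1 == c) := rfl
  rw [hp]
  rfl

-- a non-space character is encoded by the dict exactly as A emits it
theorem pv_encCh_eq (c : Char) (hs : c ≠ ' ') :
    pvMorseDict.getD c "###".toList = pvEmit c := by
  unfold pvEmit PySem.Dict.getD
  rw [pv_get?_dict]
  cases hf : code_table.find? (fun p => p.1 == c) with
  | none => simp [hs]
  | some p => simp [hs]

-- splitOnP produces no empty list-of-words
theorem pv_split_join_aux (cs : List Char) :
    PySem.Chars.join "   ".toList ((List.splitOnP (· == ' ') cs).map pvEncodeWord)
      = cs.flatMap pvEmit := by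
  induction cs with
  | nil => rfl
  | cons c cs ih =>
    rw [List.splitOnP_cons]
    obtain ⟨w, ws, hw⟩ := List.exists_cons_of_ne_nil (List.splitOnP_ne_nil (· == ' ') cs)
    by_cases hs : c = ' '
    · rw [if_pos (by simp [hs]), hw]
      rw [hw] at ih
      have hsp : pvEmit c = "   ".toList := by simp [pvEmit, hs]
      rw [List.flatMap_cons, hsp, ← ih]
      simp [PySem.Chars.join, List.intercalate, pvEncodeWord]
    · rw [if_neg (by simp [hs]), hw]
      rw [hw] at ih
      have henc : pvEncodeWord (c :: w) = pvEmit c ++ pvEncodeWord w := by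
        show (List.map _ (c :: w)).flatten = _
        rw [List.map_cons, List.flatten_cons, pv_encCh_eq c hs]
        rfl
      rw [List.modifyHead_cons, List.map_cons, henc]
      have hjoin : ∀ (x y : List Char) (l : List (List Char)),
          PySem.Chars.join "   ".toList ((x ++ y) :: l)
            = x ++ PySem.Chars.join "   ".toList (y :: l) := by
        intro x y l
        cases l <;> simp [PySem.Chars.join, List.intercalate, List.intersperse]
      rw [hjoin, List.flatMap_cons, ← ih, List.map_cons]

-- the staged split / encode / join pipeline equals the single flatMap of per-char emissions
theorem pv_split_join (cs : List Char) :
    PySem.Chars.join "   ".toList ((cs.splitOn ' ').map pvEncodeWord)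
      = cs.flatMap pvEmit := pv_split_join_aux cs

-- ===== VERDICT (by name: the statement is the Claim_ definition above) =====
theorem translate_morse_spec : Claim_equal_translate_morse := by
  intro sentence _
  unfold Spec_translate_morse translate_morse translate_morse_alt
  rw [List.foldl_ext _ _ _ (fun acc c _ => pv_stepA acc c),
    PySem.List.foldl_append_eq_flatMap, pv_split_join]
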